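-- pv_equiv track=rewrite | github.com/crupib/python | dijkstra/newdij.py | partition_into_layers
-- ===== SOURCE A (Python) =====
-- from collections import deque, defaultdict
--
-- def partition_into_layers(graph, source):
--     """BFS layers by hop-count from source."""
--     layers_map = defaultdict(list)
--     seen = {source}
--     q = deque([(source, 0)])
--     while q:
--         node, d = q.popleft()
--         layers_map[d].append(node)
--         for nb in graph.get(node, {}):
--             if nb not in seen:
--                 seen.add(nb)
--                 q.append((nb, d + 1))
--     # turn into ordered list of layers [L0, L1, ...]
--     return [layers_map[i] for i in range(len(layers_map))]
-- ===== SOURCE B (Python) =====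
-- def partition_into_layers(graph, source):
--     """BFS layers by hop-count from source, computed recursively level by level:
--     each next layer is the ordered dedup of all frontier neighbours minus the seen set."""
--     def expand(frontier, seen):
--         if not frontier:
--             return []
--         candidates = dict.fromkeys(nb for node in frontier for nb in graph.get(node, {}))
--         nxt = [nb for nb in candidates if nb not in seen]
--         return [frontier] + expand(nxt, seen | set(nxt))
--     return expand([source], {source})
-- ===== Notes on version B (the rewrite author's own statement) =====
-- stated objective: simpler
-- what changed: Replaces the depth-tagged deque, the defaultdict of layers and the final range-based reassembly by a recursive level-by-level BFS: each next layer is computed in staged passes (gather all frontier neighbours, dedup in first-occurrence order, drop seen ones) and the layer list is built by cons.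
import Mathlib
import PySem

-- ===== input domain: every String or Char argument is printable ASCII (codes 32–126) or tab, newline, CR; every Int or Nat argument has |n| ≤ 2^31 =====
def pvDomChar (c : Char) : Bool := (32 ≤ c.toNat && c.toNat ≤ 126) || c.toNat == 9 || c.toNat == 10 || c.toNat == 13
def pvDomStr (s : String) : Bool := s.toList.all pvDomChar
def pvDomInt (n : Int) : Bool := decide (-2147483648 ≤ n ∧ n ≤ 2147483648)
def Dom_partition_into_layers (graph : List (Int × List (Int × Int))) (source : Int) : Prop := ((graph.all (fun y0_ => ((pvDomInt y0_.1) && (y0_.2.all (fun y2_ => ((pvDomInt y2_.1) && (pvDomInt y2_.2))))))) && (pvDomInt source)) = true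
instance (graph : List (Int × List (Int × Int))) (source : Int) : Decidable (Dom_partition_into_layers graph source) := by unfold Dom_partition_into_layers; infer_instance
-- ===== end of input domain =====

-- B replaces A's depth-tagged deque + defaultdict + range reassembly by a recursive
-- level-by-level BFS computing each next layer in staged passes (objective: simpler).

-- ===== shared termination machinery (cited by both ports' decreasing_by) =====

-- for nb in graph.get(node, {}): iterating a dict yields its keys, in order
def pvKeys (g : List (Int × List (Int × Int))) (n : Int) : List Int :=
  ((PySem.Dict.mk g).getD n []).map Prod.fst

-- all ints that ever occur as a neighbour key (termination measure universe)
def pvU (g : List (Int × List (Int × Int))) : List Int :=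
  PySem.List.dedup (g.flatMap (fun p => p.2.map Prod.fst))

-- number of universe elements not yet seen (termination measure)
def pvUnseen (g : List (Int × List (Int × Int))) (seen : List Int) : Nat :=
  ((pvU g).filter (fun x => !seen.contains x)).length

-- A's inner neighbour loop: if nb not in seen: seen.add(nb); q.append((nb, t))
def pvScanA (ks : List Int) (t : Int) (s : List Int) (q : List (Int × Int)) :
    List Int × List (Int × Int) :=
  ks.foldl (fun p nb => if p.1.contains nb then p else (PySem.Set.add p.1 nb, p.2 ++ [(nb, t)])) (s, q)

-- ----- termination lemmas (cited by the ports' decreasing_by) -----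

lemma pvUnseen_add_lt (g : List (Int × List (Int × Int))) (s : List Int) (x : Int)
    (hx : x ∈ pvU g) (hs : x ∉ s) : pvUnseen g (s ++ [x]) < pvUnseen g s := by
  unfold pvUnseen
  have h1 : (pvU g).filter (fun y => !(s ++ [x]).contains y) =
      ((pvU g).filter (fun y => !s.contains y)).filter (fun y => !(y == x)) := by
    rw [List.filter_filter]
    apply List.filter_congr
    intro y _
    by_cases hy : y = x <;> by_cases hys : y ∈ s <;> simp [hy, hys]
  rw [h1]
  exact List.length_filter_lt_length_iff_exists.mpr
    ⟨x, by simp [List.mem_filter, hx, hs], by simp⟩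

lemma pvScanA_cons (k : Int) (ks : List Int) (t : Int) (s : List Int) (q : List (Int × Int)) :
    pvScanA (k :: ks) t s q =
      if s.contains k then pvScanA ks t s q
      else pvScanA ks t (PySem.Set.add s k) (q ++ [(k, t)]) := by
  simp only [pvScanA, List.foldl_cons]
  by_cases hc : k ∈ s <;> simp [hc]

lemma pvGet?_mk_mem {κ ν : Type} [BEq κ] [LawfulBEq κ] :
    ∀ (l : List (κ × ν)) (k : κ) (v : ν), (PySem.Dict.mk l).get? k = some v → (k, v) ∈ l := by
  intro l
  induction l with
  | nil => intro k v h; simp [PySem.Dict.get?] at h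
  | cons p l ih =>
    intro k v h
    rw [show PySem.Dict.mk (p :: l) = PySem.Dict.mk ((p.1, p.2) :: l) from rfl,
      PySem.Dict.get?_mk_cons] at h
    by_cases hb : (p.1 == k) = true
    · simp only [hb, if_true] at h
      have h1 : p.1 = k := by simpa using hb
      have h2 : p = (k, v) := by cases p; simp_all
      simp [h2]
    · simp only [hb, Bool.false_eq_true, if_false] at h
      exact List.mem_cons_of_mem _ (ih k v h)

lemma pvKeys_subU (g : List (Int × List (Int × Int))) (n : Int) :
    ∀ k ∈ pvKeys g n, k ∈ pvU g := by
  intro k hk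
  unfold pvKeys at hk
  cases h : (PySem.Dict.mk g).get? n with
  | none => rw [PySem.Dict.getD_of_get?_eq_none _ _ h] at hk; simp at hk
  | some v =>
    rw [PySem.Dict.getD_of_get?_eq_some _ _ h] at hk
    have hmem : (n, v) ∈ g := pvGet?_mk_mem g n v h
    unfold pvU
    rw [PySem.List.mem_dedup]
    exact List.mem_flatMap.2 ⟨(n, v), hmem, hk⟩

lemma pvScanA_bound (g : List (Int × List (Int × Int))) (t : Int) :
    ∀ (s : List Int) (q : List (Int × Int)) (ks : List Int), (∀ k ∈ ks, k ∈ pvU g) →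
    pvUnseen g (pvScanA ks t s q).1 + (pvScanA ks t s q).2.length ≤
      pvUnseen g s + q.length := by
  intro s q ks
  induction ks generalizing s q with
  | nil => intro _; simp [pvScanA]
  | cons k ks ih =>
    intro hks
    have hk : k ∈ pvU g := hks k (by simp)
    have hrest : ∀ k' ∈ ks, k' ∈ pvU g := fun k' h => hks k' (by simp [h])
    rw [pvScanA_cons]
    split_ifs with hc
    · exact ih s q hrest
    · have hmem : k ∉ s := by simpa using hc
      rw [PySem.Set.add_of_not_mem hmem]
      have h1 := ih (s ++ [k]) (q ++ [(k, t)]) hrest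
      have h2 := pvUnseen_add_lt g s k hk hmem
      simp only [List.length_append, List.length_cons, List.length_nil] at h1 ⊢
      omega

-- adding a nodup list of fresh universe elements to seen pays for its length
lemma pvFresh_bound (g : List (Int × List (Int × Int))) :
    ∀ (nxt seen : List Int), nxt.Nodup → (∀ x ∈ nxt, x ∉ seen ∧ x ∈ pvU g) →
      pvUnseen g (PySem.Set.update seen nxt) + nxt.length ≤ pvUnseen g seen := by
  intro nxt
  induction nxt with
  | nil => intro seen _ _; simp [PySem.Set.update]
  | cons x xs ih =>
    intro seen hnd hfr
    have hx := hfr x (by simp)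
    have hupd : PySem.Set.update seen (x :: xs) = PySem.Set.update (seen ++ [x]) xs := by
      simp [PySem.Set.update, PySem.Set.add_of_not_mem hx.1]
    rw [hupd]
    have h1 := ih (seen ++ [x])
      (by exact (List.nodup_cons.mp hnd).2)
      (by
        intro y hy
        refine ⟨?_, (hfr y (by simp [hy])).2⟩
        have hne : y ≠ x := by
          intro he; exact (List.nodup_cons.mp hnd).1 (he ▸ hy)
        have := (hfr y (by simp [hy])).1
        simp [this, hne])
    have h2 := pvUnseen_add_lt g seen x hx.2 hx.1
    simp only [List.length_cons]
    omega

-- members of B's next frontier are fresh nodup universe elements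
lemma pvNxt_ok (g : List (Int × List (Int × Int))) (frontier seen : List Int) :
    ((PySem.List.dedup (frontier.flatMap
        (fun node => ((PySem.Dict.mk g).getD node []).map Prod.fst))).filter
        (fun nb => !seen.contains nb)).Nodup ∧
    ∀ x ∈ (PySem.List.dedup (frontier.flatMap
        (fun node => ((PySem.Dict.mk g).getD node []).map Prod.fst))).filter
        (fun nb => !seen.contains nb), x ∉ seen ∧ x ∈ pvU g := by
  constructor
  · exact (PySem.List.nodup_dedup _).filter _
  · intro x hx
    have h1 := List.mem_filter.mp hx
    have h2 : x ∈ frontier.flatMap (fun node => ((PySem.Dict.mk g).getD node []).map Prod.fst) :=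
      (PySem.List.mem_dedup _ _).mp h1.1
    obtain ⟨node, _, hk⟩ := List.mem_flatMap.mp h2
    exact ⟨by simpa using h1.2, pvKeys_subU g node x hk⟩

-- ===== PORT A =====

-- the while loop over the deque q; state = (layers_map, seen, q)
def pvLoopA (g : List (Int × List (Int × Int))) (lm : PySem.Dict Int (List Int))
    (seen : List Int) (q : List (Int × Int)) : PySem.Dict Int (List Int) :=
  match q with
  | [] => lm
  | (node, d) :: q' =>
    -- layers_map[d].append(node)  (defaultdict(list))
    let lm' := lm.insert d (lm.getD d [] ++ [node])
    -- for nb in graph.get(node, {}): if nb not in seen: seen.add(nb); q.append((nb, d+1))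
    let p := pvScanA (pvKeys g node) (d + 1) seen q'
    pvLoopA g lm' p.1 p.2
termination_by pvUnseen g seen + q.length
decreasing_by
  have := pvScanA_bound g (d + 1) seen q' (pvKeys g node) (pvKeys_subU g node)
  simp only [List.length_cons]
  omega

def partition_into_layers (graph : List (Int × List (Int × Int))) (source : Int) :
    List (List Int) :=
  let lm := pvLoopA graph (PySem.Dict.mk []) (PySem.Set.ofList [source]) [(source, 0)]
  -- [layers_map[i] for i in range(len(layers_map))]
  (PySem.List.pyRange 0 (lm.size : Int) 1).map (fun i => lm.getD i [])

-- ===== PORT B =====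

-- def expand(frontier, seen): recursive level-by-level BFS; the next layer is the ordered
-- dedup (dict.fromkeys) of all frontier neighbours, minus the seen set
-- candidates = dict.fromkeys(nb for node in frontier for nb in graph.get(node, {}));
-- nxt = [nb for nb in candidates if nb not in seen]
def pvNext (g : List (Int × List (Int × Int))) (frontier seen : List Int) : List Int :=
  (PySem.List.dedup (frontier.flatMap
      (fun node => ((PySem.Dict.mk g).getD node []).map Prod.fst))).filter
    (fun nb => !seen.contains nb)

def pvExpand (g : List (Int × List (Int × Int))) (frontier seen : List Int) : List (List Int) :=
  if frontier = [] then []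
  else
    let nxt := pvNext g frontier seen
    -- [frontier] + expand(nxt, seen | set(nxt))
    frontier :: pvExpand g nxt (PySem.Set.update seen nxt)
termination_by pvUnseen g seen + frontier.length
decreasing_by
  have hok := pvNxt_ok g frontier seen
  have hb := pvFresh_bound g (pvNext g frontier seen) seen hok.1 hok.2
  have hpos : 0 < frontier.length := List.length_pos_iff.mpr (by assumption)
  simp only [pvNext] at hb ⊢
  omega

def partition_into_layers_alt (graph : List (Int × List (Int × Int))) (source : Int) :
    List (List Int) :=
  pvExpand graph [source] (PySem.Set.ofList [source])

-- ===== PRECONDITION & SPEC =====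
def Spec_partition_into_layers (graph : List (Int × List (Int × Int))) (source : Int) (out : List (List Int)) : Prop := out = partition_into_layers_alt graph source
instance (graph : List (Int × List (Int × Int))) (source : Int) (out : List (List Int)) : Decidable (Spec_partition_into_layers graph source out) := by unfold Spec_partition_into_layers; infer_instance

-- ===== CLAIM (what is proved, stated in full; the proofs are below) =====
def Claim_equal_partition_into_layers : Prop := ∀ (graph : List (Int × List (Int × Int))) (source : Int), Dom_partition_into_layers graph source → Spec_partition_into_layers graph source (partition_into_layers graph source)

-- ===== LEMMAS AND PROOFS =====

-- B's inner collection written as A does it: if nb not in seen: seen.add(nb); acc.append(nb)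
def pvColl (ks : List Int) (s acc : List Int) : List Int × List Int :=
  ks.foldl (fun p nb => if p.1.contains nb then p else (PySem.Set.add p.1 nb, p.2 ++ [nb])) (s, acc)

lemma pvColl_cons (k : Int) (ks s acc : List Int) :
    pvColl (k :: ks) s acc =
      if s.contains k then pvColl ks s acc else pvColl ks (PySem.Set.add s k) (acc ++ [k]) := by
  simp only [pvColl, List.foldl_cons]
  by_cases hc : k ∈ s <;> simp [hc]

lemma pvColl_bound (g : List (Int × List (Int × Int))) :
    ∀ (ks s acc : List Int), (∀ k ∈ ks, k ∈ pvU g) →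
      pvUnseen g (pvColl ks s acc).1 + (pvColl ks s acc).2.length ≤ pvUnseen g s + acc.length := by
  intro ks
  induction ks with
  | nil => intro s acc _; simp [pvColl]
  | cons k ks ih =>
    intro s acc hks
    have hk : k ∈ pvU g := hks k (by simp)
    have hrest : ∀ k' ∈ ks, k' ∈ pvU g := fun k' h => hks k' (by simp [h])
    rw [pvColl_cons]
    split_ifs with hc
    · exact ih s acc hrest
    · have hmem : k ∉ s := by simpa using hc
      rw [PySem.Set.add_of_not_mem hmem]
      have h1 := ih (s ++ [k]) (acc ++ [k]) hrest
      have h2 := pvUnseen_add_lt g s k hk hmem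
      simp only [List.length_append, List.length_cons, List.length_nil] at h1 ⊢
      omega

lemma pvColl_append (ks : List Int) :
    ∀ s acc, pvColl ks s acc = ((pvColl ks s []).1, acc ++ (pvColl ks s []).2) := by
  induction ks with
  | nil => intro s acc; simp [pvColl]
  | cons k ks ih =>
    intro s acc
    rw [pvColl_cons, pvColl_cons]
    simp only [List.nil_append]
    split_ifs with hc
    · exact ih s acc
    · rw [ih _ (acc ++ [k]), ih _ [k]]
      simp

lemma pvScanA_eq (t : Int) :
    ∀ (ks : List Int) (s : List Int) (q : List (Int × Int)),
      pvScanA ks t s q = ((pvColl ks s []).1, q ++ ((pvColl ks s []).2).map (fun x => (x, t))) := by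
  intro ks
  induction ks with
  | nil => intro s q; simp [pvScanA, pvColl]
  | cons k ks ih =>
    intro s q
    rw [pvScanA_cons, pvColl_cons]
    simp only [List.nil_append]
    split_ifs with hc
    · exact ih s q
    · rw [ih _ (q ++ [(k, t)]), pvColl_append ks _ [k]]
      simp

-- the common midpoint: layers still to be produced, given the processed prefix `cur` of the
-- current layer, the rest `fr` of the current layer, and the next layer collected so far `nx`
def pvCont (g : List (Int × List (Int × Int))) (seen : List Int) (cur fr nx : List Int) :
    List (List Int) :=
  match fr with
  | node :: fr' =>
    let p := pvColl (pvKeys g node) seen nx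
    pvCont g p.1 (cur ++ [node]) fr' p.2
  | [] =>
    (if cur = [] then [] else [cur]) ++ (if nx = [] then [] else pvCont g seen [] nx [])
termination_by (2 * (pvUnseen g seen + fr.length + nx.length) + (if fr = [] then 1 else 0), 0)
decreasing_by
  · have := pvColl_bound g (pvKeys g node) seen nx (pvKeys_subU g node)
    apply Prod.Lex.left
    simp only [List.length_cons]
    split <;> omega
  · apply Prod.Lex.left
    simp
    omega

-- equation lemmas for pvCont
lemma pvCont_cons (g : List (Int × List (Int × Int))) (seen cur nx : List Int) (node : Int)
    (fr' : List Int) :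
    pvCont g seen cur (node :: fr') nx =
      pvCont g (pvColl (pvKeys g node) seen nx).1 (cur ++ [node]) fr'
        (pvColl (pvKeys g node) seen nx).2 := by
  rw [pvCont]

lemma pvCont_nil (g : List (Int × List (Int × Int))) (seen cur nx : List Int) :
    pvCont g seen cur [] nx =
      (if cur = [] then [] else [cur]) ++ (if nx = [] then [] else pvCont g seen [] nx []) := by
  rw [pvCont]

-- ----- the defaultdict layers_map as a function of the layer list -----

def pvMkItems : Int → List (List Int) → List (Int × List Int)
  | _, [] => []
  | d, l :: ls => (d, l) :: pvMkItems (d + 1) ls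

def pvMk (d : Int) (ls : List (List Int)) : PySem.Dict Int (List Int) :=
  PySem.Dict.mk (pvMkItems d ls)

lemma pvMkItems_length : ∀ (ls : List (List Int)) (d : Int), (pvMkItems d ls).length = ls.length := by
  intro ls
  induction ls with
  | nil => intro d; rfl
  | cons l ls ih => intro d; simp [pvMkItems, ih]

lemma pvMkItems_append : ∀ (ls : List (List Int)) (d : Int) (x : List Int),
    pvMkItems d (ls ++ [x]) = pvMkItems d ls ++ [(d + ls.length, x)] := by
  intro ls
  induction ls with
  | nil => intro d x; simp [pvMkItems]
  | cons l ls ih =>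
    intro d x
    simp only [List.cons_append, pvMkItems, ih (d + 1) x, List.length_cons]
    have he : d + 1 + (ls.length : Int) = d + ((ls.length + 1 : Nat) : Int) := by
      push_cast; ring
    rw [he]

lemma pvMk_get?_of_ge : ∀ (ls : List (List Int)) (d k : Int), d + ls.length ≤ k →
    (pvMk d ls).get? k = none := by
  intro ls
  induction ls with
  | nil => intro d k _; rfl
  | cons l ls ih =>
    intro d k h
    simp only [List.length_cons, Nat.cast_add, Nat.cast_one] at h
    rw [pvMk, pvMkItems, PySem.Dict.get?_mk_cons]
    have hne : (d == k) = false := by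
      simp only [beq_eq_false_iff_ne, ne_eq]
      intro he
      have : (0 : Int) ≤ ls.length := by positivity
      omega
    rw [hne]
    simp only [Bool.false_eq_true, if_false]
    exact ih (d + 1) k (by omega)

lemma pvMk_get?_idx : ∀ (ls : List (List Int)) (d : Int) (i : Nat) (h : i < ls.length),
    (pvMk d ls).get? (d + i) = some ls[i] := by
  intro ls
  induction ls with
  | nil => intro d i h; simp at h
  | cons l ls ih =>
    intro d i h
    rw [pvMk, pvMkItems, PySem.Dict.get?_mk_cons]
    cases i with
    | zero => simp
    | succ i =>
      have hne : (d == d + (↑(i + 1) : Int)) = false := by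
        simp only [beq_eq_false_iff_ne, ne_eq]
        intro he
        omega
      rw [hne]
      simp only [Bool.false_eq_true, if_false]
      have := ih (d + 1) i (by simpa using h)
      rw [show d + (↑(i + 1) : Int) = (d + 1) + (i : Int) by push_cast; ring]
      simpa using this

lemma pvMk_insert_fresh (ls : List (List Int)) (d : Int) (v : List Int) :
    (pvMk d ls).insert (d + ls.length) v = pvMk d (ls ++ [v]) := by
  apply PySem.Dict.ext
  rw [PySem.Dict.items_insert_of_not_contains]
  · show pvMkItems d ls ++ [(d + ls.length, v)] = pvMkItems d (ls ++ [v])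
    rw [pvMkItems_append]
  · rw [PySem.Dict.contains_eq_isSome_get?, pvMk_get?_of_ge ls d _ (le_refl _)]
    rfl

lemma pvMkItems_key_lt : ∀ (ls : List (List Int)) (d : Int) (p : Int × List Int),
    p ∈ pvMkItems d ls → d ≤ p.1 ∧ p.1 < d + ls.length := by
  intro ls
  induction ls with
  | nil => intro d p h; simp [pvMkItems] at h
  | cons l ls ih =>
    intro d p h
    simp only [pvMkItems, List.mem_cons] at h
    rcases h with h | h
    · subst h
      simp only [List.length_cons]
      constructor
      · exact le_refl d
      · have : (0 : Int) ≤ ls.length := by positivity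
        push_cast
        omega
    · have := ih (d + 1) p h
      simp only [List.length_cons]
      push_cast
      omega

lemma pvMapSelf {α : Type} (l : List α) (f : α → α) (h : ∀ a ∈ l, f a = a) : l.map f = l := by
  induction l with
  | nil => rfl
  | cons a l ih => simp [h a (by simp), ih (fun b hb => h b (by simp [hb]))]

lemma pvMk_insert_last (ls : List (List Int)) (d : Int) (c v : List Int) :
    (pvMk d (ls ++ [c])).insert (d + ls.length) v = pvMk d (ls ++ [v]) := by
  have hget : (pvMk d (ls ++ [c])).get? (d + ls.length) = some c := by
    have := pvMk_get?_idx (ls ++ [c]) d ls.length (by simp)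
    simpa using this
  apply PySem.Dict.ext
  rw [PySem.Dict.items_insert_of_contains]
  · show (pvMkItems d (ls ++ [c])).map _ = pvMkItems d (ls ++ [v])
    rw [pvMkItems_append, pvMkItems_append, List.map_append]
    congr 1
    · apply pvMapSelf
      intro p hp
      have := pvMkItems_key_lt ls d p hp
      have hne : (p.1 == d + (ls.length : Int)) = false := by
        simp only [beq_eq_false_iff_ne, ne_eq]
        omega
      simp [hne]
    · simp
  · rw [PySem.Dict.contains_eq_isSome_get?, hget]
    rfl

lemma pvMk_getD_last (ls : List (List Int)) (d : Int) (c : List Int) :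
    (pvMk d (ls ++ [c])).getD (d + ls.length) [] = c := by
  apply PySem.Dict.getD_of_get?_eq_some _ []
  have := pvMk_get?_idx (ls ++ [c]) d ls.length (by simp)
  simpa using this

lemma pvMk_map_range (ls : List (List Int)) :
    (PySem.List.pyRange 0 (((pvMk 0 ls).size : Nat) : Int) 1).map (fun i => (pvMk 0 ls).getD i [])
      = ls := by
  have hsize : (pvMk 0 ls).size = ls.length := by
    show (pvMkItems 0 ls).length = ls.length
    exact pvMkItems_length ls 0
  rw [hsize, PySem.List.pyRange_one]
  apply List.ext_getElem
  · simp
  · intro i h1 h2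
    simp only [List.getElem_map, List.getElem_range]
    have h3 : i < ls.length := by simpa using h2
    exact PySem.Dict.getD_of_get?_eq_some _ [] (pvMk_get?_idx ls 0 i h3)

-- ----- the main correspondence: A's queue loop produces the layers pvCont describes -----

lemma pvLA (g : List (Int × List (Int × Int))) :
    ∀ (N : Nat) (seen cur fr nx : List Int) (prev : List (List Int)),
      2 * (pvUnseen g seen + fr.length + nx.length) + (if fr = [] then 1 else 0) ≤ N →
      (fr = [] → cur = [] → nx = []) →
      pvLoopA g (if cur = [] then pvMk 0 prev else pvMk 0 (prev ++ [cur])) seen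
        (fr.map (fun x => (x, (prev.length : Int))) ++
          nx.map (fun x => (x, (prev.length : Int) + 1)))
        = pvMk 0 (prev ++ pvCont g seen cur fr nx) := by
  intro N
  induction N with
  | zero =>
    intro seen cur fr nx prev hm _
    exfalso
    cases fr <;> simp at hm
  | succ N ih =>
    intro seen cur fr nx prev hm hcf
    cases fr with
    | cons node fr' =>
      simp only [List.map_cons, List.cons_append]
      rw [pvLoopA]
      rw [pvScanA_eq]
      have hbound := pvColl_bound g (pvKeys g node) seen [] (pvKeys_subU g node)
      simp only [List.length_nil, Nat.add_zero] at hbound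
      have hins : (if cur = [] then pvMk 0 prev else pvMk 0 (prev ++ [cur])).insert
          ((prev.length : Int))
          ((if cur = [] then pvMk 0 prev else pvMk 0 (prev ++ [cur])).getD ((prev.length : Int)) []
            ++ [node]) = pvMk 0 (prev ++ [cur ++ [node]]) := by
        by_cases hcur : cur = []
        · subst hcur
          simp only [if_true]
          have hnone : (pvMk 0 prev).get? ((prev.length : Int)) = none :=
            pvMk_get?_of_ge prev 0 _ (by simp)
          rw [PySem.Dict.getD_of_get?_eq_none _ [] hnone]
          have := pvMk_insert_fresh prev 0 [node]
          simpa using this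
        · simp only [if_neg hcur]
          have hgetd := pvMk_getD_last prev 0 cur
          have hlast := pvMk_insert_last prev 0 cur (cur ++ [node])
          simp only [zero_add] at hgetd hlast
          rw [hgetd, hlast]
      rw [hins]
      have hih := ih (pvColl (pvKeys g node) seen []).1 (cur ++ [node]) fr'
        (nx ++ (pvColl (pvKeys g node) seen []).2) prev
        (by
          simp only [List.length_cons, List.length_append] at hm ⊢
          split <;> omega)
        (by intro _ h; simp at h)
      simp only [if_neg (by simp : ¬(cur ++ [node] = []))] at hih
      rw [pvCont_cons, pvColl_append (pvKeys g node) seen nx]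
      simp only [List.map_append, List.append_assoc] at hih ⊢
      exact hih
    | nil =>
      by_cases hcur : cur = []
      · have hnx := hcf rfl hcur
        subst hcur; subst hnx
        simp only [List.map_nil, List.nil_append, if_true]
        rw [pvLoopA, pvCont_nil]
        simp
      · by_cases hnx : nx = []
        · subst hnx
          simp only [List.map_nil, List.nil_append, if_neg hcur]
          rw [pvLoopA, pvCont_nil]
          simp [hcur]
        · have hlen : (((prev ++ [cur]).length : Nat) : Int) = (prev.length : Int) + 1 := by
            simp
          have hih := ih seen [] nx [] (prev ++ [cur])
            (by simp [hnx] at hm ⊢; omega)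
            (by intro h; exact absurd h hnx)
          simp only [if_true, List.map_nil, List.append_nil, hlen] at hih

          simp only [List.map_nil, List.nil_append, if_neg hcur]
          rw [hih, pvCont_nil]
          simp only [if_neg hcur, if_neg hnx, List.append_assoc]

-- ----- B's staged-pass recursion produces the same layers -----

-- fr-fold of the neighbour collection = one pvColl over the concatenated key lists
lemma pvFold_eq (g : List (Int × List (Int × Int))) :
    ∀ (fr : List Int) (seen acc : List Int),
      fr.foldl (fun p node => pvColl (pvKeys g node) p.1 p.2) (seen, acc) =
        pvColl (fr.flatMap (pvKeys g)) seen acc := by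
  intro fr
  induction fr with
  | nil => intro seen acc; simp [pvColl]
  | cons node fr' ih =>
    intro seen acc
    simp only [List.foldl_cons, List.flatMap_cons]
    rw [show pvColl (pvKeys g node ++ fr'.flatMap (pvKeys g)) seen acc =
      pvColl (fr'.flatMap (pvKeys g)) (pvColl (pvKeys g node) seen acc).1
        (pvColl (pvKeys g node) seen acc).2 from by
        simp [pvColl, List.foldl_append]]
    exact ih _ _

-- when seen and acc coincide, pvColl is Set.update on both components
lemma pvColl_diag : ∀ (ks s : List Int),
    pvColl ks s s = (PySem.Set.update s ks, PySem.Set.update s ks) := by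
  intro ks
  induction ks with
  | nil => intro s; simp [pvColl, PySem.Set.update]
  | cons k ks ih =>
    intro s
    rw [pvColl_cons]
    by_cases hc : k ∈ s
    · rw [if_pos (by simpa using hc), ih s]
      have : PySem.Set.update s (k :: ks) = PySem.Set.update s ks := by
        simp [PySem.Set.update, PySem.Set.add, hc]
      rw [this]
    · rw [if_neg (by simpa using hc), PySem.Set.add_of_not_mem hc, ih (s ++ [k])]
      have : PySem.Set.update s (k :: ks) = PySem.Set.update (s ++ [k]) ks := by
        simp [PySem.Set.update, PySem.Set.add_of_not_mem hc]
      rw [this]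

-- elements collected by pvColl were not in the starting seen set
lemma pvColl_fresh : ∀ (ks s : List Int), ∀ x ∈ (pvColl ks s []).2, x ∉ s := by
  intro ks
  induction ks with
  | nil => intro s x hx; simp [pvColl] at hx
  | cons k ks ih =>
    intro s x hx
    rw [pvColl_cons] at hx
    by_cases hc : k ∈ s
    · rw [if_pos (by simpa using hc)] at hx
      exact ih s x hx
    · rw [if_neg (by simpa using hc), PySem.Set.add_of_not_mem hc] at hx
      simp only [List.nil_append] at hx
      rw [pvColl_append ks (s ++ [k]) [k]] at hx
      simp only [List.cons_append, List.nil_append, List.mem_cons] at hx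
      rcases hx with rfl | hx
      · exact hc
      · intro hs
        exact ih (s ++ [k]) x hx (by simp [hs])

-- collected output depends on the seen set only through a filter
lemma pvColl_filter : ∀ (ks s t : List Int), (∀ x ∈ t, x ∈ s) →
    (pvColl ks s []).2 = ((pvColl ks t []).2).filter (fun x => !s.contains x) := by
  intro ks
  induction ks with
  | nil => intro s t _; simp [pvColl]
  | cons k ks ih =>
    intro s t hst
    rw [pvColl_cons, pvColl_cons]
    by_cases hks : k ∈ s
    · rw [if_pos (by simpa using hks)]
      by_cases hkt : k ∈ t
      · rw [if_pos (by simpa using hkt)]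
        exact ih s t hst
      · rw [if_neg (by simpa using hkt), PySem.Set.add_of_not_mem hkt]
        simp only [List.nil_append]
        rw [pvColl_append ks (t ++ [k]) [k]]
        simp only [List.cons_append, List.nil_append, List.filter_cons]
        rw [if_neg (by simp [hks])]
        exact ih s (t ++ [k]) (by intro x hx; rcases List.mem_append.mp hx with h | h
                                  · exact hst x h
                                  · simp at h; exact h ▸ hks)
    · have hkt : k ∉ t := fun h => hks (hst k h)
      rw [if_neg (by simpa using hks), if_neg (by simpa using hkt),
        PySem.Set.add_of_not_mem hks, PySem.Set.add_of_not_mem hkt]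
      simp only [List.nil_append]
      rw [pvColl_append ks (s ++ [k]) [k], pvColl_append ks (t ++ [k]) [k]]
      simp only [List.cons_append, List.nil_append, List.filter_cons]
      rw [if_pos (by simp [hks])]
      congr 1
      have h1 := ih (s ++ [k]) (t ++ [k])
        (by intro x hx; rcases List.mem_append.mp hx with h | h
            · exact List.mem_append.mpr (Or.inl (hst x h))
            · simp at h; simp [h])
      rw [h1]
      apply List.filter_congr
      intro x hx
      have hxf := pvColl_fresh ks (t ++ [k]) x hx
      have hxk : x ≠ k := fun he => hxf (by simp [he])
      by_cases hxs : x ∈ s <;> simp [hxs, hxk]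

-- pvColl's seen output is Set.update of the input seen with the collected list
lemma pvColl_seen : ∀ (ks s : List Int),
    (pvColl ks s []).1 = PySem.Set.update s (pvColl ks s []).2 := by
  intro ks
  induction ks with
  | nil => intro s; simp [pvColl, PySem.Set.update]
  | cons k ks ih =>
    intro s
    rw [pvColl_cons]
    by_cases hc : k ∈ s
    · rw [if_pos (by simpa using hc)]
      exact ih s
    · rw [if_neg (by simpa using hc), PySem.Set.add_of_not_mem hc]
      simp only [List.nil_append]
      rw [pvColl_append ks (s ++ [k]) [k]]
      simp only
      rw [ih (s ++ [k])]
      have : ∀ l, PySem.Set.update s (k :: l) = PySem.Set.update (s ++ [k]) l := by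
        intro l
        simp [PySem.Set.update, PySem.Set.add_of_not_mem hc]
      rw [List.cons_append, List.nil_append, this]

-- the level transition computed by pvCont equals B's staged passes
lemma pvCont_level (g : List (Int × List (Int × Int))) :
    ∀ (fr seen cur nx : List Int),
      pvCont g seen cur fr nx =
        (if cur ++ fr = [] then [] else [cur ++ fr]) ++
          (if (fr.foldl (fun p node => pvColl (pvKeys g node) p.1 p.2) (seen, nx)).2 = [] then []
           else pvCont g (fr.foldl (fun p node => pvColl (pvKeys g node) p.1 p.2) (seen, nx)).1 []
             (fr.foldl (fun p node => pvColl (pvKeys g node) p.1 p.2) (seen, nx)).2 []) := by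
  intro fr
  induction fr with
  | nil =>
    intro seen cur nx
    rw [pvCont_nil]
    simp
  | cons node fr' ih =>
    intro seen cur nx
    rw [pvCont_cons, ih]
    simp [List.foldl_cons, Prod.mk.eta, List.append_assoc]

-- B's next layer and next seen, as pvColl over the concatenated keys would compute them
lemma pvNxt_eq (g : List (Int × List (Int × Int))) (fr seen : List Int) :
    pvNext g fr seen = (pvColl (fr.flatMap (pvKeys g)) seen []).2 := by
  have h1 : pvNext g fr seen = (PySem.List.dedup (fr.flatMap (pvKeys g))).filter
      (fun nb => !seen.contains nb) := rfl
  rw [h1]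
  have h2 := pvColl_filter (fr.flatMap (pvKeys g)) seen [] (by simp)
  have h3 := pvColl_diag (fr.flatMap (pvKeys g)) []
  have h4 : (pvColl (fr.flatMap (pvKeys g)) [] []).2 =
      PySem.List.dedup (fr.flatMap (pvKeys g)) := by
    rw [show pvColl (fr.flatMap (pvKeys g)) [] [] =
      pvColl (fr.flatMap (pvKeys g)) [] [] from rfl]
    have := congrArg Prod.snd h3
    simp only at this
    rw [this, PySem.List.dedup_eq_ofList]
    rfl
  rw [h2, h4]

-- B's recursion equals the pvCont midpoint
lemma pvLB (g : List (Int × List (Int × Int))) :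
    ∀ (N : Nat) (fr seen : List Int),
      2 * (pvUnseen g seen + fr.length) ≤ N →
      pvExpand g fr seen = pvCont g seen [] fr [] := by
  intro N
  induction N with
  | zero =>
    intro fr seen hm
    cases fr with
    | nil => rw [pvExpand, pvCont_nil]; simp
    | cons a fr' => exfalso; simp at hm
  | succ N ih =>
    intro fr seen hm
    cases fr with
    | nil => rw [pvExpand, pvCont_nil]; simp
    | cons a fr' =>
      rw [pvExpand, if_neg (by simp : ¬(a :: fr' = []))]
      rw [pvCont_level g (a :: fr') seen [] []]
      simp only [List.nil_append, if_neg (by simp : ¬(a :: fr' = []))]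
      rw [pvFold_eq g (a :: fr') seen []]
      set ks := (a :: fr').flatMap (pvKeys g) with hks
      have hnxt := pvNxt_eq g (a :: fr') seen
      rw [← hks] at hnxt
      rw [hnxt]
      have hseen := pvColl_seen ks seen
      by_cases hp : (pvColl ks seen []).2 = []
      · rw [if_pos hp, hp]
        rw [pvExpand]
        simp
      · rw [if_neg hp]
        have hok2 : (pvNext g (a :: fr') seen).Nodup ∧
            ∀ x ∈ pvNext g (a :: fr') seen, x ∉ seen ∧ x ∈ pvU g := pvNxt_ok g (a :: fr') seen
        rw [hnxt] at hok2
        have hb := pvFresh_bound g (pvColl ks seen []).2 seen hok2.1 hok2.2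
        rw [ih (pvColl ks seen []).2 (PySem.Set.update seen (pvColl ks seen []).2)
          (by simp only [List.length_cons] at hm; omega)]
        rw [hseen]
        simp

-- ===== VERDICT (by name: the statement is the Claim_ definition above) =====
theorem partition_into_layers_spec : Claim_equal_partition_into_layers := by
  intro g s _
  unfold Spec_partition_into_layers partition_into_layers partition_into_layers_alt
  have hset : PySem.Set.ofList [s] = [s] := rfl
  have hA := pvLA g (2 * (pvUnseen g [s] + 1 + 0) + 1) [s] [] [s] [] []
    (by
      have hne : ¬([s] : List Int) = [] := by simp
      simp only [if_neg hne, List.length_cons, List.length_nil]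
      omega)
    (by intro h; simp at h)
  simp at hA
  have hB := pvLB g (2 * (pvUnseen g [s] + 1)) [s] [s]
    (by simp only [List.length_cons, List.length_nil]; omega)
  rw [hset, hB]
  rw [show pvMk 0 [] = PySem.Dict.mk [] from rfl] at hA
  rw [hA]
  exact pvMk_map_range (pvCont g [s] [] [s] [])
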